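-- pv_equiv track=rewrite | github.com/wgfajardom/portfolio | Challenges/12_maximum_earnings_from_taxi/code_maximum_earnings_from_taxi.py | check_inputs
-- ===== SOURCE A (Python) =====
-- def check_inputs(n, rides):
--
--     # Initialize boolean validators
--     rol, ris, ril, rir, rit = True, True, True, True, True
--
--     # Validate road length
--     if (n < 1) and (n > 1e5):
--         rol = False
--
--     # Ride validations
--     # 1. Each ride should be a list of three elements (start, end, tip)
--     # 2. Length range for each ride
--     # 3. Start and end points should be located before the road end (n)
--     # 4. Tip range for each ride
--
--     for ride in rides:
--
--         # Validation 1
--         if len(ride) != 3: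
--             ris = False
--
--         else:
--             # Validation 2
--             ride_length = ride[1] - ride[0]
--             if (ride_length < 1) or (ride_length > 3e4):
--                 ril = False
--
--             # Validation 3
--             if (ride[0] > n) or (ride[1] > n):
--                 rir = False
--
--             # Validation 4
--             tip = ride[2]
--             if (tip < 1) or (tip > 1e5):
--                 rit = False
--
--     # Taking into account all the validations
--     validations = [rol, ris, ril, rir, rit]
--     overall_validation = all(validations)
--
--     return overall_validation, validations
-- ===== SOURCE B (Python) =====
-- def check_inputs(n, rides):
--     # Each validator flag computed by its own independent pass, instead of A's single shared multi-flag loop.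
--     rol = not (n < 1 and n > 1e5)
--     triples = [r for r in rides if len(r) == 3]
--     ris = len(triples) == len(rides)
--     ril = all(1 <= r[1] - r[0] <= 3e4 for r in triples)
--     rir = all(r[0] <= n and r[1] <= n for r in triples)
--     rit = all(1 <= r[2] <= 1e5 for r in triples)
--     validations = [rol, ris, ril, rir, rit]
--     return all(validations), validations
-- ===== Notes on version B (the rewrite author's own statement) =====
-- stated objective: simpler
-- what changed: Replaces A's single loop threading four mutable flags with independent single-purpose passes: a filter for well-formed rides and one all(...) per validation, assembled at the end.
import Mathlib
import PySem

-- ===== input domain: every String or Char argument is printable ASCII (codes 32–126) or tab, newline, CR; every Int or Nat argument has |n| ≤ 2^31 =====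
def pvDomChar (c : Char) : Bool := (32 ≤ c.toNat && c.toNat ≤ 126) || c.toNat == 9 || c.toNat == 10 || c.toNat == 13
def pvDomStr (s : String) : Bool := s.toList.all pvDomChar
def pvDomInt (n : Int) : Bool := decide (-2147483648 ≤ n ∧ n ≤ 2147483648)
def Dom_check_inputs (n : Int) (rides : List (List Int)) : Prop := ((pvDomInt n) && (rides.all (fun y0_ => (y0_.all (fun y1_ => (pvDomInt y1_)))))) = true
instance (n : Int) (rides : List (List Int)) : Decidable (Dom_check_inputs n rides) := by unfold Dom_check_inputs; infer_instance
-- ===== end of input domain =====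

-- B computes each validator flag by its own independent pass (filter + per-flag all) instead of A's single shared multi-flag loop; objective: simpler.

-- ===== PORT A =====
-- A's loop body: one step updating the four ride flags (ris, ril, rir, rit).
def check_inputs_step (n : Int) (s : Bool × Bool × Bool × Bool) (ride : List Int) :
    Bool × Bool × Bool × Bool :=
  let (ris, ril, rir, rit) := s
  if ride.length ≠ 3 then (false, ril, rir, rit)
  else
    let ride_length := ride.getD 1 0 - ride.getD 0 0   -- indices in range: length = 3
    let ril := if ride_length < 1 ∨ ride_length > 30000 then false else ril
    let rir := if ride.getD 0 0 > n ∨ ride.getD 1 0 > n then false else rir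
    let tip := ride.getD 2 0
    let rit := if tip < 1 ∨ tip > 100000 then false else rit
    (ris, ril, rir, rit)

def check_inputs (n : Int) (rides : List (List Int)) : Bool × List Bool :=
  let rol := if n < 1 ∧ n > 100000 then false else true
  let (ris, ril, rir, rit) := rides.foldl (check_inputs_step n) (true, true, true, true)
  let validations := [rol, ris, ril, rir, rit]
  (validations.all id, validations)

-- ===== PORT B =====
def check_inputs_alt (n : Int) (rides : List (List Int)) : Bool × List Bool :=
  let rol := !(decide (n < 1) && decide (n > 100000))
  let triples := rides.filter (fun r => r.length == 3)
  let ris := triples.length == rides.length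
  let ril := triples.all (fun r => decide (1 ≤ r.getD 1 0 - r.getD 0 0) && decide (r.getD 1 0 - r.getD 0 0 ≤ 30000))
  let rir := triples.all (fun r => decide (r.getD 0 0 ≤ n) && decide (r.getD 1 0 ≤ n))
  let rit := triples.all (fun r => decide (1 ≤ r.getD 2 0) && decide (r.getD 2 0 ≤ 100000))
  let validations := [rol, ris, ril, rir, rit]
  (validations.all id, validations)

-- ===== PRECONDITION & SPEC =====
def Spec_check_inputs (n : Int) (rides : List (List Int)) (out : Bool × List Bool) : Prop := out = check_inputs_alt n rides
instance (n : Int) (rides : List (List Int)) (out : Bool × List Bool) : Decidable (Spec_check_inputs n rides out) := by unfold Spec_check_inputs; infer_instance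

-- ===== CLAIM =====
def Claim_equal_check_inputs : Prop := ∀ (n : Int) (rides : List (List Int)), Dom_check_inputs n rides → Spec_check_inputs n rides (check_inputs n rides)

-- ===== LEMMAS AND PROOFS =====

-- One flag update of A's loop, expressed with the flag pulled out in front.
lemma flag_step (c : Prop) [Decidable c] (b x : Bool) :
    ((if c then false else b) && x) = (b && (!decide c && x)) := by
  by_cases h : c <;> simp [h]

-- Closed form of A's fold: each flag is its start value && an A-shaped per-ride pass.
lemma foldl_step_eq (n : Int) (rides : List (List Int)) (ris ril rir rit : Bool) :
    rides.foldl (check_inputs_step n) (ris, ril, rir, rit) =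
      (ris && rides.all (fun r => r.length == 3),
       ril && (rides.filter (fun r => r.length == 3)).all
         (fun r => !decide (r.getD 1 0 - r.getD 0 0 < 1 ∨ r.getD 1 0 - r.getD 0 0 > 30000)),
       rir && (rides.filter (fun r => r.length == 3)).all
         (fun r => !decide (r.getD 0 0 > n ∨ r.getD 1 0 > n)),
       rit && (rides.filter (fun r => r.length == 3)).all
         (fun r => !decide (r.getD 2 0 < 1 ∨ r.getD 2 0 > 100000))) := by
  induction rides generalizing ris ril rir rit with
  | nil => simp
  | cons r rs ih =>
    simp only [List.foldl_cons, List.all_cons, List.filter_cons]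
    by_cases h : r.length = 3
    · simp only [check_inputs_step]
      rw [if_neg (by omega)]
      rw [ih]
      simp only [h]
      exact congrArg₂ _ (by simp) (congrArg₂ _ (flag_step _ _ _)
        (congrArg₂ _ (flag_step _ _ _) (flag_step _ _ _)))
    · simp only [check_inputs_step]
      rw [if_pos h]
      rw [ih]
      simp [h]

-- ===== VERDICT =====
theorem check_inputs_spec : Claim_equal_check_inputs := by
  intro n rides _
  show check_inputs n rides = check_inputs_alt n rides
  unfold check_inputs check_inputs_alt
  rw [foldl_step_eq]
  simp only [Bool.true_and]
  have hrol : (if n < 1 ∧ n > 100000 then false else true)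
      = !(decide (n < 1) && decide (n > 100000)) := by
    by_cases h1 : n < 1 <;> by_cases h2 : n > 100000 <;> simp [h1, h2]
  have hris : (rides.all (fun r => r.length == 3))
      = ((rides.filter (fun r => r.length == 3)).length == rides.length) := by
    rcases Bool.eq_false_or_eq_true (rides.all (fun r => r.length == 3)) with h | h <;>
      rw [h] <;> [skip; symm] <;> simp_all [List.length_filter_eq_length_iff, List.all_eq_true]
  have hril : ∀ r : List Int,
      (!decide (r.getD 1 0 - r.getD 0 0 < 1 ∨ r.getD 1 0 - r.getD 0 0 > 30000))
      = (decide (1 ≤ r.getD 1 0 - r.getD 0 0) && decide (r.getD 1 0 - r.getD 0 0 ≤ 30000)) := by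
    intro r; simp [← decide_not, not_lt]
  have hrir : ∀ r : List Int,
      (!decide (r.getD 0 0 > n ∨ r.getD 1 0 > n))
      = (decide (r.getD 0 0 ≤ n) && decide (r.getD 1 0 ≤ n)) := by
    intro r; simp [← decide_not, not_lt]
  have hrit : ∀ r : List Int,
      (!decide (r.getD 2 0 < 1 ∨ r.getD 2 0 > 100000))
      = (decide (1 ≤ r.getD 2 0) && decide (r.getD 2 0 ≤ 100000)) := by
    intro r; simp [← decide_not, not_lt]
  simp only [hrol, hris, funext hril, funext hrir, funext hrit]
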